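-- pv_equiv track=rewrite | github.com/dominguez-j/TDA-Buchwald | TP 3/TP3/Algoritmos/battleship_greedy.py | demandas_validas
-- ===== SOURCE A (Python) =====
-- def demandas_validas(d_filas, d_cols, posicion, alto, ancho): # O(W)
--     d_filas_actualizadas = {}
--     d_cols_actualizadas = {}
--
--     for i in range(posicion[0], posicion[0] + alto):
--         for j in range(posicion[1], posicion[1] + ancho):
--             if i >= len(d_filas) or j >= len(d_cols):
--                 return False
--
--             if i not in d_filas_actualizadas:
--                 d_filas_actualizadas[i] = d_filas[i]
--             d_filas_actualizadas[i] -= 1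
--
--             if j not in d_cols_actualizadas:
--                 d_cols_actualizadas[j] = d_cols[j]
--             d_cols_actualizadas[j] -= 1
--
--             if d_filas_actualizadas[i] < 0 or d_cols_actualizadas[j] < 0:
--                 return False
--
--     return True
-- ===== SOURCE B (Python) =====
-- def demandas_validas(d_filas, d_cols, posicion, alto, ancho):
--     r = posicion[0]
--     if alto <= 0:
--         return True
--     c = posicion[1]
--     if ancho <= 0:
--         return True
--     if r + alto > len(d_filas) or c + ancho > len(d_cols):
--         return False
--     return (all(d_filas[i] >= ancho for i in range(r, r + alto))
--             and all(d_cols[j] >= alto for j in range(c, c + ancho)))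
-- ===== Notes on version B (the rewrite author's own statement) =====
-- stated objective: simpler
-- what changed: A walks every cell of the alto x ancho rectangle keeping dicts of decremented row/column demands; B checks the rectangle bounds once and then tests each of the alto rows (demand >= ancho) and each of the ancho columns (demand >= alto) in a single pass each.
import Mathlib
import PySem

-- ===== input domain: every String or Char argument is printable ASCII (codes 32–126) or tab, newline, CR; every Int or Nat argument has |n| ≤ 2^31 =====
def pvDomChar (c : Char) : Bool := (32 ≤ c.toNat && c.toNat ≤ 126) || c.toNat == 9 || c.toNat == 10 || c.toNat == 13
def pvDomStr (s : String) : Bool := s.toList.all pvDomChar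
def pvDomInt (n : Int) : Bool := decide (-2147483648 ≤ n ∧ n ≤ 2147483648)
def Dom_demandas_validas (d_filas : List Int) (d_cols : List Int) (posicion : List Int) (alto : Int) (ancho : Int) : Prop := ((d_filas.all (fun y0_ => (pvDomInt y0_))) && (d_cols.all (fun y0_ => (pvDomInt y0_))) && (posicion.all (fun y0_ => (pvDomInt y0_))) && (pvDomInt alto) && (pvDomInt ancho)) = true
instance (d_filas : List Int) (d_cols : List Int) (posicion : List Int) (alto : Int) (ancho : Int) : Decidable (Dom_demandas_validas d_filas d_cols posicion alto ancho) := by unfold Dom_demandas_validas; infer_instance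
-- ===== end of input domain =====

-- B (simpler): instead of A's cell-by-cell walk over the whole alto×ancho rectangle with running
-- dicts of decremented demands, B checks the rectangle bounds once and then tests each row
-- (demand ≥ ancho) and each column (demand ≥ alto) directly.


-- ===== PORT A =====
-- inner `for j` loop: `none` = the Python raises (IndexError from a d[...] access);
-- `some (.inl b)` = an early `return b`; `some (.inr st)` = the loop finished with updated dicts.
def dvInner (d_filas d_cols : List Int) (i : Int) :
    List Int → PySem.Dict Int Int → PySem.Dict Int Int →
    Option (Bool ⊕ (PySem.Dict Int Int × PySem.Dict Int Int))
  | [], fU, cU => some (.inr (fU, cU))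
  | j :: js, fU, cU =>
    if (d_filas.length : Int) ≤ i ∨ (d_cols.length : Int) ≤ j then some (.inl false)
    else
      match (if fU.contains i then some fU
             else (PySem.List.pyGet? d_filas i).map (fun v => fU.insert i v)) with
      | none => none
      | some fU1 =>
        let fU2 := fU1.modify i 0 (· - 1)
        match (if cU.contains j then some cU
               else (PySem.List.pyGet? d_cols j).map (fun v => cU.insert j v)) with
        | none => none
        | some cU1 =>
          let cU2 := cU1.modify j 0 (· - 1)
          if fU2.getD i 0 < 0 ∨ cU2.getD j 0 < 0 then some (.inl false)
          else dvInner d_filas d_cols i js fU2 cU2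

-- outer `for i` loop; `posicion[1]` is evaluated on each outer iteration, as in the Python.
def dvOuter (d_filas d_cols posicion : List Int) (ancho : Int) :
    List Int → PySem.Dict Int Int → PySem.Dict Int Int → Option Bool
  | [], _, _ => some true
  | i :: is, fU, cU =>
    match PySem.List.pyGet? posicion 1 with
    | none => none
    | some c =>
      match dvInner d_filas d_cols i (PySem.List.pyRange c (c + ancho)) fU cU with
      | none => none
      | some (.inl b) => some b
      | some (.inr st) => dvOuter d_filas d_cols posicion ancho is st.1 st.2

def demandas_validas (d_filas : List Int) (d_cols : List Int) (posicion : List Int) (alto : Int) (ancho : Int) : Bool :=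
  match PySem.List.pyGet? posicion 0 with
  | none => false  -- the Python raises IndexError here; such inputs are outside Pre_
  | some r =>
    (dvOuter d_filas d_cols posicion ancho (PySem.List.pyRange r (r + alto))
      PySem.Dict.empty PySem.Dict.empty).getD false  -- `none` = the Python raises; outside Pre_

-- ===== PORT B =====
def demandas_validas_alt (d_filas : List Int) (d_cols : List Int) (posicion : List Int) (alto : Int) (ancho : Int) : Bool :=
  match PySem.List.pyGet? posicion 0 with
  | none => false  -- the Python raises IndexError here; such inputs are outside Pre_
  | some r =>
    if alto ≤ 0 then true
    else
      match PySem.List.pyGet? posicion 1 with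
      | none => false  -- IndexError; outside Pre_
      | some c =>
        if ancho ≤ 0 then true
        else if (d_filas.length : Int) < r + alto ∨ (d_cols.length : Int) < c + ancho then false
        else
          ((PySem.List.pyRange r (r + alto)).all (fun i =>
              match PySem.List.pyGet? d_filas i with
              | some v => decide (ancho ≤ v)
              | none => false))  -- `none` = IndexError in the Python; outside Pre_
          && ((PySem.List.pyRange c (c + ancho)).all (fun j =>
              match PySem.List.pyGet? d_cols j with
              | some v => decide (alto ≤ v)
              | none => false))

-- ===== PRECONDITION & SPEC =====
-- Pre_ excludes exactly the inputs on which the Python A raises an IndexError: posicion shorter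
-- than the indices it reads, or a start index below -len that makes d_filas[i] / d_cols[j] raise.
def Pre_demandas_validas (d_filas : List Int) (d_cols : List Int) (posicion : List Int) (alto : Int) (ancho : Int) : Prop :=
  posicion ≠ [] ∧
  (1 ≤ alto → 2 ≤ (posicion.length : Int) ∧
    (1 ≤ ancho →
      (d_filas.length : Int) ≤ PySem.List.pyGetD posicion 0 0 ∨
      (d_cols.length : Int) ≤ PySem.List.pyGetD posicion 1 0 ∨
      (-(d_filas.length : Int) ≤ PySem.List.pyGetD posicion 0 0 ∧
       -(d_cols.length : Int) ≤ PySem.List.pyGetD posicion 1 0)))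
instance (d_filas : List Int) (d_cols : List Int) (posicion : List Int) (alto : Int) (ancho : Int) : Decidable (Pre_demandas_validas d_filas d_cols posicion alto ancho) := by unfold Pre_demandas_validas; infer_instance

def pvWitness_demandas_validas : List Int × List Int × List Int × Int × Int := ([1], [1], [0, 0], 1, 1)

def Spec_demandas_validas (d_filas : List Int) (d_cols : List Int) (posicion : List Int) (alto : Int) (ancho : Int) (out : Bool) : Prop := out = demandas_validas_alt d_filas d_cols posicion alto ancho
instance (d_filas : List Int) (d_cols : List Int) (posicion : List Int) (alto : Int) (ancho : Int) (out : Bool) : Decidable (Spec_demandas_validas d_filas d_cols posicion alto ancho out) := by unfold Spec_demandas_validas; infer_instance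

-- ===== CLAIM (what is proved, stated in full; the proofs are below) =====
def Claim_equal_demandas_validas : Prop := ∀ (d_filas : List Int) (d_cols : List Int) (posicion : List Int) (alto : Int) (ancho : Int), Dom_demandas_validas d_filas d_cols posicion alto ancho → Pre_demandas_validas d_filas d_cols posicion alto ancho → Spec_demandas_validas d_filas d_cols posicion alto ancho (demandas_validas d_filas d_cols posicion alto ancho)

-- ===== LEMMAS AND PROOFS =====

-- current remaining demand A's dicts hold for key `k` (source value if the key was never touched)
def dvVal (d : PySem.Dict Int Int) (src : List Int) (k : Int) : Int :=
  if d.contains k then d.getD k 0 else PySem.List.pyGetD src k 0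

lemma pyGet?_in (xs : List Int) (i : Int) (h1 : -(xs.length : Int) ≤ i) (h2 : i < (xs.length : Int)) :
    PySem.List.pyGet? xs i = some (PySem.List.pyGetD xs i 0) := by
  have hs : (PySem.List.pyGet? xs i).isSome := by
    rcases Int.lt_or_le i 0 with hneg | hpos
    · simp only [PySem.List.pyGet?, PySem.List.pyIdx?, if_neg (by omega : ¬ 0 ≤ i), if_pos h1]
      simp [List.getElem?_eq_getElem (show xs.length - (-i).toNat < xs.length by omega)]
    · simp only [PySem.List.pyGet?, PySem.List.pyIdx?, if_pos hpos, if_pos h2]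
      simp [List.getElem?_eq_getElem (show i.toNat < xs.length by omega)]
  rw [PySem.List.pyGetD]
  obtain ⟨v, hv⟩ := Option.isSome_iff_exists.mp hs
  simp [hv]

lemma pyGet?_cons_zero (x : Int) (xs : List Int) : PySem.List.pyGet? (x :: xs) 0 = some x := by
  simp [PySem.List.pyGet?, PySem.List.pyIdx?]

lemma pyGet?_cons_cons_one (x y : Int) (xs : List Int) :
    PySem.List.pyGet? (x :: y :: xs) 1 = some y := by
  simp [PySem.List.pyGet?, PySem.List.pyIdx?]

lemma pyGetD_cons_zero (x : Int) (xs : List Int) : PySem.List.pyGetD (x :: xs) 0 0 = x := by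
  simp [PySem.List.pyGetD]

lemma pyGetD_cons_cons_one (x y : Int) (xs : List Int) :
    PySem.List.pyGetD (x :: y :: xs) 1 0 = y := by
  simp [PySem.List.pyGetD]

lemma pyRange_one_length (a b : Int) (h : a ≤ b) :
    ((PySem.List.pyRange a b).length : Int) = b - a := by
  simp [PySem.List.pyRange]; omega

-- the "ensure the key is in the dict" step of A's loop body
lemma dvEnsure (src : List Int) (d : PySem.Dict Int Int) (k : Int)
    (hkL : -(src.length : Int) ≤ k) (hkR : k < (src.length : Int)) :
    ∃ d1, (if d.contains k then some d
           else (PySem.List.pyGet? src k).map (fun v => d.insert k v)) = some d1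
      ∧ d1.contains k = true
      ∧ d1.getD k 0 = dvVal d src k
      ∧ (∀ x, x ≠ k → d1.contains x = d.contains x ∧ d1.getD x 0 = d.getD x 0) := by
  cases hc : d.contains k with
  | true =>
    exact ⟨d, by simp, hc, by simp [dvVal, hc], fun x _ => ⟨rfl, rfl⟩⟩
  | false =>
    refine ⟨d.insert k (PySem.List.pyGetD src k 0), ?_, ?_, ?_, ?_⟩
    · simp [pyGet?_in src k hkL hkR]
    · simp
    · simp [dvVal, hc]
    · intro x hx
      simp [PySem.Dict.contains_insert, PySem.Dict.getD_insert, hx]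

lemma dvInner_run (dF dC : List Int) (i : Int)
    (hiL : -(dF.length : Int) ≤ i) (hiR : i < (dF.length : Int)) :
    ∀ (js : List Int) (fU cU : PySem.Dict Int Int),
      js.Nodup →
      (∀ j ∈ js, -(dC.length : Int) ≤ j) →
      if (∀ j ∈ js, j < (dC.length : Int) ∧ 1 ≤ dvVal cU dC j) ∧
          (js = [] ∨ (js.length : Int) ≤ dvVal fU dF i) then
        ∃ fU' cU', dvInner dF dC i js fU cU = some (.inr (fU', cU')) ∧
          dvVal fU' dF i = dvVal fU dF i - js.length ∧
          (∀ x, x ≠ i → fU'.contains x = fU.contains x ∧ fU'.getD x 0 = fU.getD x 0) ∧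
          (∀ j, dvVal cU' dC j = if j ∈ js then dvVal cU dC j - 1 else dvVal cU dC j)
      else dvInner dF dC i js fU cU = some (.inl false) := by
  intro js
  induction js with
  | nil =>
    intro fU cU _ _
    rw [if_pos ⟨by simp, Or.inl rfl⟩]
    exact ⟨fU, cU, by simp [dvInner], by simp, fun x _ => ⟨rfl, rfl⟩, by simp⟩
  | cons j js ih =>
    intro fU cU hnd hval
    have hjL : -(dC.length : Int) ≤ j := hval j (by simp)
    have hndt : js.Nodup := hnd.of_cons
    have hjnot : j ∉ js := (List.nodup_cons.mp hnd).1
    by_cases hjC : (dC.length : Int) ≤ j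
    · rw [if_neg ?_]
      · simp [dvInner, hjC]
      · rintro ⟨hall, -⟩
        have := (hall j (by simp)).1; omega
    · push_neg at hjC
      obtain ⟨fU1, hfU1eq, hfU1c, hfU1g, hfU1o⟩ := dvEnsure dF fU i hiL hiR
      obtain ⟨cU1, hcU1eq, hcU1c, hcU1g, hcU1o⟩ := dvEnsure dC cU j hjL hjC
      have hstep : dvInner dF dC i (j :: js) fU cU =
          (if (fU1.modify i 0 (· - 1)).getD i 0 < 0 ∨ (cU1.modify j 0 (· - 1)).getD j 0 < 0
           then some (.inl false)
           else dvInner dF dC i js (fU1.modify i 0 (· - 1)) (cU1.modify j 0 (· - 1))) := by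
        rw [dvInner, if_neg (by push_neg; exact ⟨by omega, by omega⟩), hfU1eq, hcU1eq]
      set fU2 := fU1.modify i 0 (· - 1) with hfU2def
      set cU2 := cU1.modify j 0 (· - 1) with hcU2def
      have hfU2g : fU2.getD i 0 = dvVal fU dF i - 1 := by
        rw [hfU2def, PySem.Dict.getD_modify_self, hfU1g]
      have hcU2g : cU2.getD j 0 = dvVal cU dC j - 1 := by
        rw [hcU2def, PySem.Dict.getD_modify_self, hcU1g]
      have hfU2c : fU2.contains i = true := by
        simp [hfU2def, PySem.Dict.contains_modify]
      have hcU2c : cU2.contains j = true := by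
        simp [hcU2def, PySem.Dict.contains_modify]
      have hfU2v : dvVal fU2 dF i = dvVal fU dF i - 1 := by simp [dvVal, hfU2c, hfU2g]
      have hcU2v : dvVal cU2 dC j = dvVal cU dC j - 1 := by simp [dvVal, hcU2c, hcU2g]
      have hfU2o : ∀ x, x ≠ i → fU2.contains x = fU.contains x ∧ fU2.getD x 0 = fU.getD x 0 := by
        intro x hx
        refine ⟨?_, ?_⟩
        · rw [hfU2def, PySem.Dict.contains_modify]; simp [hx, (hfU1o x hx).1]
        · rw [hfU2def, PySem.Dict.getD_modify_of_ne _ _ _ hx, (hfU1o x hx).2]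
      have hcU2o : ∀ x, x ≠ j → cU2.contains x = cU.contains x ∧ cU2.getD x 0 = cU.getD x 0 := by
        intro x hx
        refine ⟨?_, ?_⟩
        · rw [hcU2def, PySem.Dict.contains_modify]; simp [hx, (hcU1o x hx).1]
        · rw [hcU2def, PySem.Dict.getD_modify_of_ne _ _ _ hx, (hcU1o x hx).2]
      have hcU2vo : ∀ x, x ≠ j → dvVal cU2 dC x = dvVal cU dC x := by
        intro x hx; simp [dvVal, (hcU2o x hx).1, (hcU2o x hx).2]
      by_cases hfail : dvVal fU dF i - 1 < 0 ∨ dvVal cU dC j - 1 < 0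
      · rw [if_neg ?_]
        · rw [hstep, if_pos (by rw [hfU2g, hcU2g]; exact hfail)]
        · rintro ⟨hall, hlen⟩
          have h1 := (hall j (by simp)).2
          have h2 : ((js.length : Int)) + 1 ≤ dvVal fU dF i := by
            rcases hlen with h | h
            · exact absurd h (by simp)
            · simpa [Int.add_comm] using h
          have : (0 : Int) ≤ (js.length : Int) := by positivity
          omega
      · push_neg at hfail
        have hih := ih fU2 cU2 hndt (fun j' hj' => hval j' (by simp [hj']))
        have hiff : ((∀ j' ∈ j :: js, j' < (dC.length : Int) ∧ 1 ≤ dvVal cU dC j') ∧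
              (j :: js = [] ∨ (((j :: js).length : Int)) ≤ dvVal fU dF i)) ↔
            ((∀ j' ∈ js, j' < (dC.length : Int) ∧ 1 ≤ dvVal cU2 dC j') ∧
              (js = [] ∨ ((js.length : Int)) ≤ dvVal fU2 dF i)) := by
        
          constructor
          · rintro ⟨hall, hlen⟩
            refine ⟨fun j' hj' => ?_, ?_⟩
            · rw [hcU2vo j' (fun h => hjnot (h ▸ hj'))]
              exact hall j' (by simp [hj'])
            · rcases hlen with h | h
              · exact absurd h (by simp)
              · right; rw [hfU2v]; simp only [List.length_cons] at h; push_cast at h ⊢; omega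
          · rintro ⟨hall, hlen⟩
            refine ⟨?_, ?_⟩
            · intro j' hj'
              rcases List.mem_cons.mp hj' with rfl | hj'
              · exact ⟨hjC, by omega⟩
              · rw [← hcU2vo j' (fun h => hjnot (h ▸ hj'))]
                exact hall j' hj'
            · right
              rcases hlen with rfl | h
              · simp; omega
              · rw [hfU2v] at h; simp only [List.length_cons]; push_cast at h ⊢; omega
        by_cases hcond : (∀ j' ∈ js, j' < (dC.length : Int) ∧ 1 ≤ dvVal cU2 dC j') ∧
            (js = [] ∨ ((js.length : Int)) ≤ dvVal fU2 dF i)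
        · rw [if_pos hcond] at hih
          obtain ⟨fU', cU', heq, hfv', hfo', hcv'⟩ := hih
          rw [if_pos (hiff.mpr hcond)]
          refine ⟨fU', cU', ?_, ?_, ?_, ?_⟩
          · rw [hstep, if_neg (by rw [hfU2g, hcU2g]; push_neg; exact hfail), heq]
          · rw [hfv', hfU2v]; simp only [List.length_cons]; push_cast; ring
          · intro x hx
            have h1 := hfo' x hx
            have h2 := hfU2o x hx
            exact ⟨h1.1.trans h2.1, h1.2.trans h2.2⟩
          · intro x
            by_cases hxj : x = j
            · subst hxj
              rw [hcv' x, if_neg hjnot, hcU2v, if_pos (by simp)]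
            · rw [hcv' x, hcU2vo x hxj]
              by_cases hxin : x ∈ js
              · rw [if_pos hxin, if_pos (by simp [hxin])]
              · rw [if_neg hxin, if_neg (by simp [hxin, hxj])]
        · rw [if_neg hcond] at hih
          rw [if_neg (fun h => hcond (hiff.mp h))]
          rw [hstep, if_neg (by rw [hfU2g, hcU2g]; push_neg; exact hfail), hih]

lemma dvInner_oob (dF dC : List Int) (i j : Int) (js : List Int)
    (fU cU : PySem.Dict Int Int) (h : (dF.length : Int) ≤ i) :
    dvInner dF dC i (j :: js) fU cU = some (.inl false) := by
  simp [dvInner, h]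

lemma dvOuter_empty_cols (dF dC pos : List Int) (ancho c : Int)
    (hpos : PySem.List.pyGet? pos 1 = some c)
    (hc : PySem.List.pyRange c (c + ancho) = []) :
    ∀ (is : List Int) (fU cU : PySem.Dict Int Int),
      dvOuter dF dC pos ancho is fU cU = some true := by
  intro is
  induction is with
  | nil => intro fU cU; simp [dvOuter]
  | cons i is ih => intro fU cU; simp [dvOuter, hpos, hc, dvInner, ih]

lemma dvOuter_run (dF dC pos : List Int) (ancho c : Int)
    (hpos : PySem.List.pyGet? pos 1 = some c)
    (hne : PySem.List.pyRange c (c + ancho) ≠ [])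
    (hcL : ∀ j ∈ PySem.List.pyRange c (c + ancho), -(dC.length : Int) ≤ j) :
    ∀ (is : List Int) (k : Int) (fU cU : PySem.Dict Int Int),
      is.Nodup →
      (∀ i ∈ is, -(dF.length : Int) ≤ i) →
      (∀ i ∈ is, fU.contains i = false) →
      (∀ j ∈ PySem.List.pyRange c (c + ancho), dvVal cU dC j = PySem.List.pyGetD dC j 0 - k) →
      dvOuter dF dC pos ancho is fU cU =
        some (decide ((∀ i ∈ is, i < (dF.length : Int) ∧
            ((PySem.List.pyRange c (c + ancho)).length : Int) ≤ PySem.List.pyGetD dF i 0) ∧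
          (is = [] ∨ ∀ j ∈ PySem.List.pyRange c (c + ancho),
            j < (dC.length : Int) ∧ (is.length : Int) + k ≤ PySem.List.pyGetD dC j 0))) := by
  intro is
  induction is with
  | nil =>
    intro k fU cU _ _ _ _
    simp [dvOuter]
  | cons i is ih =>
    intro k fU cU hnd hL hcont hcv
    have hndt : is.Nodup := hnd.of_cons
    have hinotin : i ∉ is := (List.nodup_cons.mp hnd).1
    obtain ⟨jc, cols', hcols⟩ : ∃ jc cols', PySem.List.pyRange c (c + ancho) = jc :: cols' := by
      cases h : PySem.List.pyRange c (c + ancho) with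
      | nil => exact absurd h hne
      | cons a b => exact ⟨a, b, rfl⟩
    simp only [dvOuter, hpos]
    by_cases hiF : (dF.length : Int) ≤ i
    · rw [hcols, dvInner_oob _ _ _ _ _ _ _ hiF]
      simp only []
      congr 1
      symm
      rw [decide_eq_false_iff_not]
      rintro ⟨h1, -⟩
      have := (h1 i (by simp)).1; omega
    · push_neg at hiF
      have hiLone : -(dF.length : Int) ≤ i := hL i (by simp)
      have hrun := dvInner_run dF dC i hiLone hiF (PySem.List.pyRange c (c + ancho)) fU cU
        (PySem.List.nodup_pyRange_one c (c + ancho)) hcL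
      have hfv : dvVal fU dF i = PySem.List.pyGetD dF i 0 := by
        simp [dvVal, hcont i (by simp)]
      by_cases hcnd : (∀ j ∈ PySem.List.pyRange c (c + ancho),
            j < (dC.length : Int) ∧ 1 ≤ dvVal cU dC j) ∧
          (PySem.List.pyRange c (c + ancho) = [] ∨
            (((PySem.List.pyRange c (c + ancho)).length : Int)) ≤ dvVal fU dF i)
      · rw [if_pos hcnd] at hrun
        obtain ⟨fU', cU', heq, hfv', hfo', hcv'⟩ := hrun
        rw [heq]
        simp only []
        rw [ih (k + 1) fU' cU' hndt (fun x hx => hL x (by simp [hx]))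
          (fun x hx => by
            rw [(hfo' x (by rintro rfl; exact hinotin hx)).1]
            exact hcont x (by simp [hx]))
          (fun j hj => by
            rw [hcv' j, if_pos hj, hcv j hj]; ring)]
        congr 1
        rw [decide_eq_decide]
        symm
        constructor
        · rintro ⟨hall, hlen⟩
          refine ⟨fun x hx => hall x (by simp [hx]), ?_⟩
          rcases hlen with h | h
          · exact absurd h (by simp)
          · by_cases hisnil : is = []
            · exact Or.inl hisnil
            · right
              intro j hj
              have := h j hj
              simp only [List.length_cons] at this
              refine ⟨this.1, by push_cast at this ⊢; omega⟩
        · rintro ⟨hall, hlen⟩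
          refine ⟨?_, ?_⟩
          · intro x hx
            rcases List.mem_cons.mp hx with rfl | hx
            · exact ⟨hiF, by rw [← hfv]; exact hcnd.2.resolve_left (by rw [hcols]; simp)⟩
            · exact hall x hx
          · right
            intro j hj
            have hc1 := (hcnd.1 j hj)
            have hc2 := hcv j hj
            rcases hlen with rfl | h
            · refine ⟨hc1.1, ?_⟩
              simp only [List.length_cons, List.length_nil]
              push_cast
              omega
            · have := h j hj
              refine ⟨hc1.1, ?_⟩
              simp only [List.length_cons] at this ⊢
              push_cast at this ⊢
              omega
      · rw [if_neg hcnd] at hrun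
        rw [hrun]
        simp only []
        congr 1
        symm
        rw [decide_eq_false_iff_not]
        rintro ⟨h1, h2⟩
        apply hcnd
        constructor
        · intro j hj
          have hc2 := hcv j hj
          rcases h2 with h2 | h2
          · exact absurd h2 (by simp)
          · have := h2 j hj
            have hnn : (0 : Int) ≤ (is.length : Int) := by positivity
            refine ⟨this.1, ?_⟩
            simp only [List.length_cons] at this
            push_cast at this
            omega
        · right
          rw [hfv]
          exact (h1 i (by simp)).2

-- ===== VERDICT (by name: the statement is the Claim_ definition above) =====
theorem demandas_validas_spec : Claim_equal_demandas_validas := by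
  intro dF dC pos alto ancho _hDom hPre
  unfold Spec_demandas_validas
  obtain ⟨hne0, hPre2⟩ := hPre
  rcases pos with _ | ⟨r, rest⟩
  · exact absurd rfl hne0
  simp only [demandas_validas, demandas_validas_alt, pyGet?_cons_zero]
  by_cases halto : alto ≤ 0
  · rw [PySem.List.pyRange_one_eq_nil (by omega : r + alto ≤ r)]
    simp [dvOuter, halto]
  · push_neg at halto
    obtain ⟨hlen2, hPre3⟩ := hPre2 (by omega)
    rcases rest with _ | ⟨c, rest'⟩
    · simp at hlen2
    rw [if_neg (by omega)]
    simp only [pyGet?_cons_cons_one]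
    by_cases hancho : ancho ≤ 0
    · rw [if_pos hancho,
        dvOuter_empty_cols dF dC _ ancho c (pyGet?_cons_cons_one r c rest')
          (PySem.List.pyRange_one_eq_nil (by omega))]
      simp
    · push_neg at hancho
      rw [if_neg (by omega)]
      specialize hPre3 (by omega)
      rw [pyGetD_cons_zero, pyGetD_cons_cons_one] at hPre3
      have hrowsc := PySem.List.pyRange_one_cons (show r < r + alto by omega)
      have hcolsc := PySem.List.pyRange_one_cons (show c < c + ancho by omega)
      rcases hPre3 with hF | hC | ⟨hrL, hcL⟩
      · -- first row is out of bounds: both sides are false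
        rw [hrowsc]
        simp only [dvOuter, pyGet?_cons_cons_one]
        rw [hcolsc, dvInner_oob _ _ _ _ _ _ _ hF]
        rw [if_pos (Or.inl (by omega))]
        rfl
      · -- first column is out of bounds: both sides are false
        rw [hrowsc]
        simp only [dvOuter, pyGet?_cons_cons_one]
        rw [hcolsc, dvInner]
        rw [if_pos (Or.inr (by omega))]
        rw [if_pos (Or.inr (by omega))]
        rfl
      · -- the main case: no wraparound below -len
        have hrows_ne : PySem.List.pyRange r (r + alto) ≠ [] := by rw [hrowsc]; simp
        have hcols_ne : PySem.List.pyRange c (c + ancho) ≠ [] := by rw [hcolsc]; simp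
        have hcolsL : ∀ j ∈ PySem.List.pyRange c (c + ancho), -(dC.length : Int) ≤ j := by
          intro j hj
          have := PySem.List.mem_pyRange_one.mp hj
          omega
        rw [dvOuter_run dF dC (r :: c :: rest') ancho c (pyGet?_cons_cons_one r c rest')
          hcols_ne hcolsL (PySem.List.pyRange r (r + alto)) 0 PySem.Dict.empty PySem.Dict.empty
          (PySem.List.nodup_pyRange_one r (r + alto))
          (fun i hi => by have := PySem.List.mem_pyRange_one.mp hi; omega)
          (fun i _ => by simp)
          (fun j _ => by simp [dvVal])]
        simp only [Option.getD_some]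
        have hlrows : ((PySem.List.pyRange r (r + alto)).length : Int) = alto := by
          rw [pyRange_one_length r (r + alto) (by omega)]; ring
        have hlcols : ((PySem.List.pyRange c (c + ancho)).length : Int) = ancho := by
          rw [pyRange_one_length c (c + ancho) (by omega)]; ring
        by_cases hb : (dF.length : Int) < r + alto ∨ (dC.length : Int) < c + ancho
        · rw [if_pos hb, decide_eq_false_iff_not]
          rintro ⟨h1, h2⟩
          rcases hb with hb | hb
          · have := (h1 (r + alto - 1) (PySem.List.mem_pyRange_one.mpr ⟨by omega, by omega⟩)).1
            omega
          · rcases h2 with h2 | h2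
            · exact hrows_ne h2
            · have := (h2 (c + ancho - 1) (PySem.List.mem_pyRange_one.mpr ⟨by omega, by omega⟩)).1
              omega
        · rw [if_neg hb]
          push_neg at hb
          rw [Bool.eq_iff_iff]
          simp only [Bool.and_eq_true, List.all_eq_true, decide_eq_true_eq]
          constructor
          · rintro ⟨h1, h2⟩
            have h2' : ∀ j ∈ PySem.List.pyRange c (c + ancho),
                j < (dC.length : Int) ∧ ((PySem.List.pyRange r (r + alto)).length : Int) + 0
                  ≤ PySem.List.pyGetD dC j 0 := h2.resolve_left hrows_ne
            refine ⟨?_, ?_⟩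
            · intro i hi
              have hm := PySem.List.mem_pyRange_one.mp hi
              rw [pyGet?_in dF i (by omega) (by omega)]
              have := (h1 i hi).2
              rw [hlcols] at this
              simpa using this
            · intro j hj
              have hm := PySem.List.mem_pyRange_one.mp hj
              rw [pyGet?_in dC j (by omega) (by omega)]
              have := (h2' j hj).2
              rw [hlrows] at this
              simp only [add_zero] at this
              simpa using this
          · rintro ⟨h1, h2⟩
            refine ⟨?_, Or.inr ?_⟩
            · intro i hi
              have hm := PySem.List.mem_pyRange_one.mp hi
              have := h1 i hi
              rw [pyGet?_in dF i (by omega) (by omega)] at this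
              simp only [decide_eq_true_eq] at this
              exact ⟨by omega, by rw [hlcols]; exact this⟩
            · intro j hj
              have hm := PySem.List.mem_pyRange_one.mp hj
              have := h2 j hj
              rw [pyGet?_in dC j (by omega) (by omega)] at this
              simp only [decide_eq_true_eq] at this
              exact ⟨by omega, by rw [hlrows]; omega⟩
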